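-- pv_equiv track=rewrite | github.com/fork-archive-hub/pdfmux | design-system/lint.py | is_inside_style
-- ===== SOURCE A (Python) =====
-- def is_inside_style(lines: list[str], line_idx: int) -> bool:
--     """Check if a line is inside a <style> block."""
--     in_style = False
--     for i in range(line_idx):
--         if "<style" in lines[i]:
--             in_style = True
--         if "</style>" in lines[i]:
--             in_style = False
--     return in_style
-- ===== SOURCE B (Python) =====
-- def is_inside_style(lines: list[str], line_idx: int) -> bool:
--     """Check if a line is inside a <style> block."""
--     for i in range(line_idx - 1, -1, -1):
--         line = lines[i]
--         if "</style>" in line: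
--             return False
--         if "<style" in line:
--             return True
--     return False
-- ===== Notes on version B (the rewrite author's own statement) =====
-- stated objective: alternative
-- what changed: Replaces the forward boolean-toggle fold over the whole prefix with a backward scan that returns at the first tag-bearing line (the governing boundary), checking </style> before <style>.
import Mathlib
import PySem

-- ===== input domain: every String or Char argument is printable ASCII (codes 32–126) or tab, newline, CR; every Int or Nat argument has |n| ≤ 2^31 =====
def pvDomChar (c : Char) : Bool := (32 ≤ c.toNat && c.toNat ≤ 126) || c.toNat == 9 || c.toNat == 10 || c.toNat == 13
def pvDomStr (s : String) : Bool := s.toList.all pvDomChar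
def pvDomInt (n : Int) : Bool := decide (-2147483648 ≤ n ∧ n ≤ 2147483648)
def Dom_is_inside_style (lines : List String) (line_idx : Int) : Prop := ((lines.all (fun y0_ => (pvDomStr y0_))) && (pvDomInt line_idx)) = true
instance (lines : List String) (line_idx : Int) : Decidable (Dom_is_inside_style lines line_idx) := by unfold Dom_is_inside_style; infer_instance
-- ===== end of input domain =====

-- B changes the traversal: a backward scan returning at the first tag-bearing line instead of A's forward toggle fold; same result, no speed claim.

-- ===== PORT A =====
-- forward toggle over range(line_idx); lines[i] is in range under Pre_, so pyGetD "" is exact there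
def is_inside_style (lines : List String) (line_idx : Int) : Bool :=
  (PySem.List.pyRange 0 line_idx 1).foldl (fun in_style i =>
    let s := PySem.List.pyGetD lines i ""
    let in_style := if PySem.Str.isIn "<style" s then true else in_style
    if PySem.Str.isIn "</style>" s then false else in_style) false

-- ===== PORT B =====
-- backward scan: i runs line_idx-1, …, 0; first tag-bearing line decides
def scanBackStyle (lines : List String) : Nat → Bool
  | 0 => false
  | n + 1 =>
    let s := PySem.List.pyGetD lines (n : Int) ""
    if PySem.Str.isIn "</style>" s then false
    else if PySem.Str.isIn "<style" s then true
    else scanBackStyle lines n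

def is_inside_style_alt (lines : List String) (line_idx : Int) : Bool :=
  scanBackStyle lines line_idx.toNat

-- ===== PRECONDITION & SPEC =====
-- Pre_ excludes exactly the inputs where Python A raises IndexError (line_idx exceeding len(lines))
def Pre_is_inside_style (lines : List String) (line_idx : Int) : Prop :=
  line_idx ≤ (lines.length : Int)
instance (lines : List String) (line_idx : Int) : Decidable (Pre_is_inside_style lines line_idx) := by unfold Pre_is_inside_style; infer_instance

def pvWitness_is_inside_style : List String × Int := (["<style>", "a", "</style>"], 2)

def Spec_is_inside_style (lines : List String) (line_idx : Int) (out : Bool) : Prop := out = is_inside_style_alt lines line_idx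
instance (lines : List String) (line_idx : Int) (out : Bool) : Decidable (Spec_is_inside_style lines line_idx out) := by unfold Spec_is_inside_style; infer_instance

-- ===== CLAIM =====
def Claim_equal_is_inside_style : Prop := ∀ (lines : List String) (line_idx : Int), Dom_is_inside_style lines line_idx → Pre_is_inside_style lines line_idx → Spec_is_inside_style lines line_idx (is_inside_style lines line_idx)

-- ===== LEMMAS AND PROOFS =====

-- the forward fold over range(0, n) computes exactly the backward scan's answer
theorem fold_eq_scanBack (lines : List String) (n : Nat) :
    (PySem.List.pyRange 0 (n : Int) 1).foldl (fun in_style i =>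
      let s := PySem.List.pyGetD lines i ""
      let in_style := if PySem.Str.isIn "<style" s then true else in_style
      if PySem.Str.isIn "</style>" s then false else in_style) false
    = scanBackStyle lines n := by
  induction n with
  | zero => simp [PySem.List.pyRange_one_eq_nil, scanBackStyle]
  | succ n ih =>
    push_cast
    rw [PySem.List.pyRange_one_succ_right (Int.natCast_nonneg n), List.foldl_append]
    simp only [List.foldl_cons, List.foldl_nil]
    rw [ih]; rfl

theorem is_inside_style_spec : Claim_equal_is_inside_style := by
  intro lines line_idx _ _
  unfold Spec_is_inside_style is_inside_style is_inside_style_alt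
  by_cases h : line_idx ≤ 0
  · rw [PySem.List.pyRange_one_eq_nil h]
    have : line_idx.toNat = 0 := Int.toNat_of_nonpos h
    simp [this, scanBackStyle]
  · have : line_idx = (line_idx.toNat : Int) := (Int.toNat_of_nonneg (by omega)).symm
    rw [this]
    exact fold_eq_scanBack lines line_idx.toNat
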